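-- pv_equiv track=rewrite | github.com/Al-Tangg/Dana | 복습기록/n진수게임.py | solution
-- ===== SOURCE A (Python) =====
-- def solution(n, t, m, p):
--     answer = []
--     jinsu = "0"
--     num = 1
--     alpha = ["A", "B", "C", "D", "E", "F"]
--
--     while len(jinsu) < t*m:
--         jin = ""
--         tmp_num = num
--
--         while tmp_num:
--             namuji = tmp_num % n
--             if namuji >= 10:
--                 jin = alpha[namuji-10] + jin
--             else:
--                 jin = str(tmp_num%n) + jin
--             tmp_num //= n
--
--         num += 1
--         jinsu += jin
--
--     i = 0
--     while len(answer) < t: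
--         if i % m + 1 == p:
--             answer.append(jinsu[i])
--         i += 1
--
--     return ''.join(answer)
-- ===== SOURCE B (Python) =====
-- def solution(n, t, m, p):
--     # Resolve each wanted character directly from its global index in the
--     # infinite base-n digit stream "0" + base(1) + base(2) + ..., instead of
--     # materialising the whole string.
--     def char_at(idx):
--         if idx == 0:
--             return "0"
--         i = idx - 1  # index into the stream of numbers >= 1
--         d = 1
--         while True:
--             block = (n - 1) * n ** (d - 1) * d  # chars contributed by d-digit numbers
--             if i < block:
--                 number = n ** (d - 1) + i // d
--                 digit = number // n ** (d - 1 - i % d) % n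
--                 return "0123456789ABCDEF"[digit]
--             i -= block
--             d += 1
--
--     return ''.join(char_at(k * m + p - 1) for k in range(t))
-- ===== Notes on version B (the rewrite author's own statement) =====
-- stated objective: faster
-- what changed: Instead of materialising the whole concatenated base-n string and scanning it index by index, B computes each of the t requested global indices k*m+p-1 directly and resolves the character with digit-group arithmetic (numbers of d base-n digits form a block of (n-1)*n^(d-1)*d characters), keeping no string at all.
-- outside the precondition, e.g. on solution(20, 2, 3, 1): A returns '03', B returns '03'; on solution(-2, 1, 2, 2): A returns '-', B returns 'F'
import Mathlib
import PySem

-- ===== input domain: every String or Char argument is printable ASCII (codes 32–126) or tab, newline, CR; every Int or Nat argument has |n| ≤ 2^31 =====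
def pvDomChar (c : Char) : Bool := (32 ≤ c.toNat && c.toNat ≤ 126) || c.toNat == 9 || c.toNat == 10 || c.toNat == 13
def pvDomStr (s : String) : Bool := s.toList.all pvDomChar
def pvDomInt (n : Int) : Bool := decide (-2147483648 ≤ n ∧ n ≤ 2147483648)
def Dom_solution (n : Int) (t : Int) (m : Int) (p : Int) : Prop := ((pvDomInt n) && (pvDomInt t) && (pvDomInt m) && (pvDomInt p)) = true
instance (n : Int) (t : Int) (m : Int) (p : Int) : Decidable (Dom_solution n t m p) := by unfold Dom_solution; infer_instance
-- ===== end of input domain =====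

-- B resolves each requested character directly by index arithmetic on the digit stream
-- instead of materialising the whole concatenated base-n string (objective: faster).

-- ===== PORT A =====
-- A's strings are carried as List Char (jin, jinsu, answer); '+' on str = List append, len = length.
def pvAlpha : List String := ["A", "B", "C", "D", "E", "F"]

-- inner `while tmp_num:` loop; fuel-indexed (the Python loop does not terminate for n ≤ 1,
-- outside Pre_; inside Pre_ the fuel passed is sufficient, see lemma pvJin_eq_rep).
-- alpha[namuji-10] is list indexing: PySem.List.pyGetD ("" on IndexError, unreachable under Pre_).
def pvJin (n : Int) : Nat → Int → List Char → List Char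
  | 0, _, jin => jin
  | fuel+1, tmp, jin =>
      if tmp ≠ 0 then
        let r := PySem.Int.mod tmp n
        let piece : List Char :=
          if r ≥ 10 then (PySem.List.pyGetD pvAlpha (r - 10) "").toList
          else (PySem.Int.toStr r).toList
        pvJin n fuel (PySem.Int.floordiv tmp n) (piece ++ jin)
      else jin

-- outer `while len(jinsu) < t*m:` loop; fuel (t*m).toNat is sufficient inside Pre_
-- (each iteration appends at least one character).  jinsu is carried in reverse with its
-- length alongside, so `jinsu += jin` / `len(jinsu)` keep Python's amortised-O(1) cost;
-- the value (recovered by a final .reverse) is identical.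
def pvBuild (n : Int) (tm : Int) : Nat → Int → List Char → Int → List Char × Int
  | 0, _, rev, len => (rev, len)
  | fuel+1, num, rev, len =>
      if len < tm then
        let jin := pvJin n num.natAbs num []
        pvBuild n tm fuel (num + 1) (jin.reverse ++ rev) (len + jin.length)
      else (rev, len)

-- `while len(answer) < t:` loop; jinsu[i] is PySem.List.pyGetD (IndexError unreachable under Pre_).
def pvPick (m p t : Int) (jinsu : List Char) : Nat → Int → List Char → List Char
  | 0, _, ans => ans
  | fuel+1, i, ans =>
      if (ans.length : Int) < t then
        pvPick m p t jinsu fuel (i + 1)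
          (if PySem.Int.mod i m + 1 = p then ans ++ [PySem.List.pyGetD jinsu i ' '] else ans)
      else ans

def solution (n : Int) (t : Int) (m : Int) (p : Int) : String :=
  let jinsu := (pvBuild n (t * m) (t * m).toNat 1 ['0'] 1).1.reverse
  String.ofList (pvPick m p t jinsu (t * m).toNat 0 [])

-- ===== PORT B =====
def pvDigits : String := "0123456789ABCDEF"

-- `while True:` loop of char_at; fuel-indexed (inside Pre_ the fuel passed is sufficient:
-- each skipped digit-length group has at least one character).  n ** (d-1) is ported as
-- n ^ (d-1).toNat, exact for the d ≥ 1 the loop maintains.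
def pvCharLoop (n : Int) : Nat → Int → Int → String
  | 0, _, _ => ""
  | fuel+1, i, d =>
      let block := (n - 1) * n ^ (d - 1).toNat * d
      if i < block then
        let number := n ^ (d - 1).toNat + PySem.Int.floordiv i d
        let digit := PySem.Int.mod (PySem.Int.floordiv number (n ^ (d - 1 - PySem.Int.mod i d).toNat)) n
        String.ofList (PySem.Str.pyGet? pvDigits digit).toList
      else pvCharLoop n fuel (i - block) (d + 1)

def pvCharAt (n : Int) (idx : Int) : String :=
  if idx = 0 then "0"
  else pvCharLoop n ((idx - 1).toNat + 1) (idx - 1) 1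

def solution_alt (n : Int) (t : Int) (m : Int) (p : Int) : String :=
  PySem.Str.join "" ((PySem.List.pyRange 0 t 1).map (fun k => pvCharAt n (k * m + p - 1)))

-- ===== PRECONDITION & SPEC =====
-- Pre_ restricts to the game's natural domain: when characters are actually picked (t ≥ 1)
-- the column must exist (1 ≤ p ≤ m; otherwise A loops forever or raises IndexError), and
-- when the base-n string is actually built (t*m ≥ 2) the base must be 2..16 (n ≤ 1 makes A
-- loop forever, n = 0 raises ZeroDivisionError, and a base outside 2..16 eventually hits an
-- IndexError in alpha or produces accidental '-1' digit strings; conservatively this also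
-- excludes a few n > 16 inputs with tiny t*m on which A still returns — see claim cites).
def Pre_solution (n : Int) (t : Int) (m : Int) (p : Int) : Prop :=
  (t ≤ 0 ∨ (1 ≤ p ∧ p ≤ m)) ∧ (t * m ≤ 1 ∨ (2 ≤ n ∧ n ≤ 16))
instance (n : Int) (t : Int) (m : Int) (p : Int) : Decidable (Pre_solution n t m p) := by
  unfold Pre_solution; infer_instance

def pvWitness_solution : Int × Int × Int × Int := (2, 3, 2, 1)

def Spec_solution (n : Int) (t : Int) (m : Int) (p : Int) (out : String) : Prop := out = solution_alt n t m p
instance (n : Int) (t : Int) (m : Int) (p : Int) (out : String) : Decidable (Spec_solution n t m p out) := by unfold Spec_solution; infer_instance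

-- ===== CLAIM (what is proved, stated in full; the proofs are below) =====
def Claim_equal_solution : Prop := ∀ (n : Int) (t : Int) (m : Int) (p : Int), Dom_solution n t m p → Pre_solution n t m p → Spec_solution n t m p (solution n t m p)

-- ===== LEMMAS AND PROOFS =====

-- Nat-level model: base-N digits (MSB first), the digit stream, and its characters.
def pvDigitChar (v : Nat) : Char := pvDigits.toList.getD v ' '

def pvDigs (N : Nat) (x : Nat) : List Nat :=
  if h : x = 0 ∨ N < 2 then [] else
    pvDigs N (x / N) ++ [x % N]
termination_by x
decreasing_by exact Nat.div_lt_self (by omega) (by omega)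

def pvRep (N x : Nat) : List Char := (pvDigs N x).map pvDigitChar

def pvF (N a b : Nat) : List Char := (List.range' a b).flatMap (pvRep N)

def pvPref (N M : Nat) : List Char := '0' :: pvF N 1 M

-- the character of the stream of numbers ≥ 1 at position j, and of the full stream at i
def pvGF (N j : Nat) : Char := (pvF N 1 (j + 1)).getD j ' '
def pvSChar (N i : Nat) : Char := (pvPref N i).getD i ' '

theorem pvDigs_zero (N : Nat) : pvDigs N 0 = [] := by rw [pvDigs]; simp

theorem pvDigs_ne_nil {N x : Nat} (hN : 2 ≤ N) (hx : 1 ≤ x) : pvDigs N x ≠ [] := by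
  rw [pvDigs]; simp; omega

theorem pvDigs_spec {N : Nat} (hN : 2 ≤ N) :
    ∀ d, 1 ≤ d → ∀ x, N ^ (d - 1) ≤ x → x < N ^ d →
      (pvDigs N x).length = d ∧ ∀ j, j < d → (pvDigs N x).getD j 0 = x / N ^ (d - 1 - j) % N := by
  intro d
  induction d with
  | zero => omega
  | succ d ih =>
      intro _ x hlo hhi
      have hx1 : 1 ≤ x := by
        have : 1 ≤ N ^ d := Nat.one_le_pow _ _ (by omega)
        simp at hlo; omega
      rw [pvDigs, dif_neg (by omega)]
      by_cases hd : d = 0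
      · subst hd
        have hxN : x < N := by simpa using hhi
        rw [Nat.div_eq_of_lt hxN, pvDigs_zero]
        refine ⟨by simp, ?_⟩
        intro j hj
        interval_cases j
        simp [Nat.mod_eq_of_lt hxN, Nat.div_one]
      · have hd1 : 1 ≤ d := by omega
        have hlo' : N ^ (d - 1) ≤ x / N := by
          rw [Nat.le_div_iff_mul_le (by omega)]
          calc N ^ (d - 1) * N = N ^ d := by
                rw [← pow_succ]; congr 1; omega
            _ ≤ x := hlo
        have hhi' : x / N < N ^ d := by
          rw [Nat.div_lt_iff_lt_mul (by omega)]
          calc x < N ^ (d + 1) := hhi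
            _ = N ^ d * N := by rw [pow_succ]
        obtain ⟨hlen, hget⟩ := ih hd1 (x / N) hlo' hhi'
        constructor
        · simp [hlen]
        · intro j hj
          by_cases hjd : j < d
          · rw [List.getD_append _ _ _ _ (by omega), hget j hjd,
              Nat.div_div_eq_div_mul]
            congr 2
            rw [← pow_succ']
            congr 1
            omega
          · have hje : j = d := by omega
            subst hje
            rw [List.getD_append_right _ _ _ _ (by omega)]
            simp [hlen]

theorem pvF_concat (N a b : Nat) : pvF N a (b + 1) = pvF N a b ++ pvRep N (a + b) := by
  unfold pvF; rw [List.range'_concat]; simp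

theorem pvF_split (N a b c : Nat) : pvF N a (b + c) = pvF N a b ++ pvF N (a + b) c := by
  unfold pvF
  rw [show List.range' a (b + c) = List.range' a b ++ List.range' (a + b) c by
        simpa using (List.range'_append (s := a) (m := b) (n := c) (step := 1)).symm,
      List.flatMap_append]

theorem len_pvF_ge {N : Nat} (hN : 2 ≤ N) (b : Nat) : b ≤ (pvF N 1 b).length := by
  induction b with
  | zero => simp [pvF]
  | succ b ih =>
      rw [pvF_concat]
      have h1 : 1 ≤ (pvRep N (1 + b)).length := by
        have := pvDigs_ne_nil hN (x := 1 + b) (by omega)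
        simp [pvRep]
        exact List.length_pos_of_ne_nil this
      simp only [List.length_append]; omega

theorem pvF_prefix {N M M' : Nat} (h : M ≤ M') : pvF N 1 M <+: pvF N 1 M' := by
  have : M' = M + (M' - M) := by omega
  rw [this, pvF_split]; exact List.prefix_append _ _

theorem pvGF_stab {N : Nat} (hN : 2 ≤ N) {M j : Nat} (h : j < (pvF N 1 M).length) :
    (pvF N 1 M).getD j ' ' = pvGF N j := by
  have hj : j < (pvF N 1 (j + 1)).length := by
    have := len_pvF_ge hN (j + 1); omega
  have h1 : pvF N 1 M <+: pvF N 1 (max M (j + 1)) := pvF_prefix (le_max_left _ _)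
  have h2 : pvF N 1 (j + 1) <+: pvF N 1 (max M (j + 1)) := pvF_prefix (le_max_right _ _)
  unfold pvGF
  rw [List.getD_eq_getElem _ _ h, List.getD_eq_getElem _ _ hj,
    h1.getElem h, h2.getElem hj]

theorem pvSChar_stab {N : Nat} (hN : 2 ≤ N) {M i : Nat} (h : i < (pvPref N M).length) :
    (pvPref N M).getD i ' ' = pvSChar N i := by
  unfold pvSChar
  cases i with
  | zero => simp [pvPref]
  | succ j =>
      simp only [pvPref, List.getD_cons_succ] at *
      have h' : j < (pvF N 1 M).length := by simpa [pvPref] using h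
      rw [pvGF_stab hN h']
      have hj : j < (pvF N 1 (j + 1)).length := by
        have := len_pvF_ge hN (j + 1); omega
      rw [pvGF_stab hN hj]

theorem pvSChar_succ {N : Nat} (hN : 2 ≤ N) (j : Nat) : pvSChar N (j + 1) = pvGF N j := by
  unfold pvSChar pvGF
  simp only [pvPref, List.getD_cons_succ]

-- piece of pvJin: both branches produce exactly the digit character, for 0 ≤ v ≤ 15
theorem pvPiece_eq (v : Nat) (hv : v ≤ 15) :
    (if ((v : Int)) ≥ 10 then (PySem.List.pyGetD pvAlpha ((v : Int) - 10) "").toList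
     else (PySem.Int.toStr (v : Int)).toList) = [pvDigitChar v] := by
  interval_cases v <;> decide

theorem pvJin_eq_rep {n : Int} (hn2 : 2 ≤ n) (hn16 : n ≤ 16) :
    ∀ (fuel : Nat) (tmp : Int) (jin : List Char), 0 ≤ tmp → tmp.toNat ≤ fuel →
      pvJin n fuel tmp jin = pvRep n.toNat tmp.toNat ++ jin := by
  intro fuel
  induction fuel with
  | zero =>
      intro tmp jin h0 hf
      have : tmp = 0 := by omega
      subst this
      simp [pvJin, pvRep, pvDigs_zero]
  | succ fuel ih =>
      intro tmp jin h0 hf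
      by_cases htmp : tmp = 0
      · subst htmp
        simp [pvJin, pvRep, pvDigs_zero]
      · set N := n.toNat with hNdef
        have hN2 : 2 ≤ N := by omega
        have hn : n = (N : Int) := by omega
        set x := tmp.toNat with hxdef
        have hx1 : 1 ≤ x := by omega
        have htmp' : tmp = (x : Int) := by omega
        rw [pvJin, if_pos htmp]
        have hmod : PySem.Int.mod tmp n = ((x % N : Nat) : Int) := by
          rw [htmp', hn, PySem.Int.mod_natCast]
        have hdiv : PySem.Int.floordiv tmp n = ((x / N : Nat) : Int) := by
          rw [htmp', hn, PySem.Int.floordiv_natCast]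
        have hv15 : x % N ≤ 15 := by
          have := Nat.mod_lt x (show 0 < N by omega); omega
        have hpiece := pvPiece_eq (x % N) hv15
        simp only [hmod, hdiv, hpiece]
        rw [ih _ _ (by positivity) (by
          have : x / N < x := Nat.div_lt_self (by omega) (by omega)
          simp only [Int.toNat_natCast]; omega)]
        simp only [Int.toNat_natCast]
        rw [show pvRep N x = pvRep N (x / N) ++ [pvDigitChar (x % N)] by
          unfold pvRep
          conv_lhs => rw [pvDigs, dif_neg (by omega)]
          simp]
        simp

theorem pvBuild_inv {n tm : Int} (hn2 : 2 ≤ n) (hn16 : n ≤ 16) :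
    ∀ (fuel : Nat) (M : Nat), tm ≤ 1 + (pvF n.toNat 1 M).length + fuel →
      ∃ M', M ≤ M' ∧ pvBuild n tm fuel (↑(M + 1)) (pvPref n.toNat M).reverse (↑(pvPref n.toNat M).length)
          = ((pvPref n.toNat M').reverse, (↑(pvPref n.toNat M').length : Int)) ∧
        tm ≤ (pvPref n.toNat M').length := by
  intro fuel
  induction fuel with
  | zero =>
      intro M hfuel
      exact ⟨M, le_refl _, rfl, by unfold pvPref; simp; omega⟩
  | succ fuel ih =>
      intro M hfuel
      by_cases hg : ((pvPref n.toNat M).length : Int) < tm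
      · simp only [pvBuild, if_pos hg]
        have hjin : pvJin n (↑(M + 1) : Int).natAbs (↑(M + 1) : Int) [] =
            pvRep n.toNat (M + 1) := by
          rw [pvJin_eq_rep hn2 hn16 _ _ _ (by omega) (by omega)]
          simp
        have hstep : pvPref n.toNat M ++ pvJin n (↑(M + 1) : Int).natAbs (↑(M + 1) : Int) []
            = pvPref n.toNat (M + 1) := by
          rw [hjin]
          unfold pvPref
          rw [pvF_concat]
          simp [Nat.add_comm]
        have hlen1 : 1 ≤ (pvRep n.toNat (M + 1)).length := by
          have := pvDigs_ne_nil (N := n.toNat) (x := M + 1) (by omega) (by omega)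
          unfold pvRep
          simp only [List.length_map]
          exact List.length_pos_of_ne_nil this
        have hrec := ih (M + 1) (by
          have : (pvF n.toNat 1 (M + 1)).length = (pvF n.toNat 1 M).length + (pvRep n.toNat (1 + M)).length := by
            rw [pvF_concat]; simp
          rw [Nat.add_comm 1 M] at this
          omega)
        obtain ⟨M', hM', heq, hlen⟩ := hrec
        refine ⟨M', by omega, ?_, hlen⟩
        have hrev : (pvJin n (↑(M + 1) : Int).natAbs (↑(M + 1) : Int) []).reverse ++ (pvPref n.toNat M).reverse
            = (pvPref n.toNat (M + 1)).reverse := by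
          rw [← List.reverse_append, hstep]
        have hlen2 : ((pvPref n.toNat M).length : Int) + ((pvJin n (↑(M + 1) : Int).natAbs (↑(M + 1) : Int) []).length : Int)
            = ((pvPref n.toNat (M + 1)).length : Int) := by
          have h := congrArg List.length hstep
          rw [List.length_append] at h
          exact_mod_cast h
        rw [hrev, hlen2,
          show ((M + 1 : Nat) : Int) + 1 = ((M + 1 + 1 : Nat) : Int) by push_cast; ring]
        exact heq
      · rw [pvBuild, if_neg hg]
        exact ⟨M, le_refl _, rfl, by omega⟩

theorem pvBuild_jinsu {n tm : Int} (hn2 : 2 ≤ n) (hn16 : n ≤ 16)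
    (hfuel : tm ≤ 1 + ((tm.toNat : Nat) : Int)) :
    ∃ M', (pvBuild n tm tm.toNat 1 ['0'] 1).1.reverse = pvPref n.toNat M' ∧
      tm ≤ (pvPref n.toNat M').length := by
  obtain ⟨M', _, heq, hlen⟩ := pvBuild_inv (tm := tm) hn2 hn16 tm.toNat 0 (by simp [pvF]; omega)
  refine ⟨M', ?_, hlen⟩
  have h := congrArg (fun q : List Char × Int => q.1.reverse) heq
  simp only [List.reverse_reverse] at h
  exact h

-- characters picked by the second loop, as a function of how many have been picked
def pvAnsOf (jinsu : List Char) (mN pN c : Nat) : List Char :=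
  (List.range c).map (fun k => jinsu.getD (k * mN + pN - 1) ' ')

theorem pvAnsOf_len (jinsu : List Char) (mN pN c : Nat) :
    (pvAnsOf jinsu mN pN c).length = c := by simp [pvAnsOf]

theorem pvPick_done {m p t : Int} {jinsu ans} (h : t ≤ (ans.length : Int)) :
    ∀ (fuel : Nat) (i : Int), pvPick m p t jinsu fuel i ans = ans := by
  intro fuel i; cases fuel <;> simp [pvPick, show ¬((ans.length : Int) < t) by omega]

theorem pvPick_cycle {m p t : Int} {jinsu : List Char} {mN pN tN : Nat}
    (hm : m = (mN : Int)) (hp : p = (pN : Int)) (ht : t = (tN : Int))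
    (hp1 : 1 ≤ pN) (hpm : pN ≤ mN) {k : Nat} (hk : k < tN) :
    ∀ (s r : Nat), r + s = mN → (if pN ≤ r then 1 else 0) + k ≤ tN →
      ∀ (fuel : Nat),
      pvPick m p t jinsu (s + fuel) (↑(k * mN + r)) (pvAnsOf jinsu mN pN (k + if pN ≤ r then 1 else 0)) =
      pvPick m p t jinsu fuel (↑((k + 1) * mN)) (pvAnsOf jinsu mN pN (k + 1)) := by
  intro s
  induction s with
  | zero =>
      intro r hr hc fuel
      have hrm : r = mN := by omega
      rw [hrm, if_pos hpm, Nat.zero_add, show k * mN + mN = (k + 1) * mN by ring]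
  | succ s ih =>
      intro r hr hc fuel
      have hrm : r < mN := by omega
      by_cases hcT : k + (if pN ≤ r then 1 else 0) = tN
      · have hpr : pN ≤ r := by
          by_contra h
          rw [if_neg h] at hcT
          omega
        rw [if_pos hpr] at hcT ⊢
        have hl : t ≤ ((pvAnsOf jinsu mN pN (k + 1)).length : Int) := by
          rw [pvAnsOf_len, ht]
          exact_mod_cast Nat.le_of_eq hcT.symm
        rw [pvPick_done hl, pvPick_done hl]
      · have hic : (if pN ≤ r then 1 else 0) + k < tN := by omega
        rw [show s + 1 + fuel = (s + fuel) + 1 by omega, pvPick]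
        rw [if_pos (by
          rw [pvAnsOf_len, ht]
          have : k + (if pN ≤ r then 1 else 0) < tN := by omega
          exact_mod_cast this)]
        have hmod : PySem.Int.mod (↑(k * mN + r)) m + 1 = ((r : Int)) + 1 := by
          rw [hm, PySem.Int.mod_natCast]
          congr 2
          rw [show k * mN + r = r + k * mN by ring, Nat.add_mul_mod_self_right,
            Nat.mod_eq_of_lt hrm]
        rw [hmod]
        by_cases hr1 : r + 1 = pN
        · rw [if_pos (by rw [hp]; exact_mod_cast congrArg (Nat.cast (R := Int)) hr1)]
          have hprn : ¬ pN ≤ r := by omega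
          rw [if_neg hprn, Nat.add_zero]
          have happ : pvAnsOf jinsu mN pN k ++ [PySem.List.pyGetD jinsu (↑(k * mN + r)) ' '] =
              pvAnsOf jinsu mN pN (k + 1) := by
            rw [PySem.List.pyGetD_natCast]
            unfold pvAnsOf
            rw [List.range_succ]
            simp only [List.map_append, List.map_cons, List.map_nil]
            congr 3
            omega
          rw [happ,
            show (↑(k * mN + r) : Int) + 1 = (↑(k * mN + (r + 1)) : Int) by push_cast; ring]
          have := ih (r + 1) (by omega) (by rw [if_pos (by omega)]; omega) fuel
          rw [if_pos (by omega)] at this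
          exact this
        · rw [if_neg (by rw [hp]; intro h; exact hr1 (by exact_mod_cast h))]
          rw [show (↑(k * mN + r) : Int) + 1 = (↑(k * mN + (r + 1)) : Int) by push_cast; ring]
          have hif : (if pN ≤ r + 1 then 1 else 0) = (if pN ≤ r then 1 else 0) := by
            by_cases h : pN ≤ r
            · rw [if_pos h, if_pos (by omega)]
            · rw [if_neg h, if_neg (by omega)]
          have := ih (r + 1) (by omega) (by rw [hif]; omega) fuel
          rw [hif] at this
          exact this

theorem pvPick_outer {m p t : Int} {jinsu : List Char} {mN pN tN : Nat}
    (hm : m = (mN : Int)) (hp : p = (pN : Int)) (ht : t = (tN : Int))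
    (hp1 : 1 ≤ pN) (hpm : pN ≤ mN) :
    ∀ (q k f : Nat), k + q = tN →
      pvPick m p t jinsu (q * mN + f) (↑(k * mN)) (pvAnsOf jinsu mN pN k) =
      pvAnsOf jinsu mN pN tN := by
  intro q
  induction q with
  | zero =>
      intro k f hk
      have : k = tN := by omega
      subst this
      exact pvPick_done (by rw [pvAnsOf_len, ht]) _ _
  | succ q ih =>
      intro k f hk
      have hklt : k < tN := by omega
      have hcyc := pvPick_cycle (jinsu := jinsu) hm hp ht hp1 hpm hklt mN 0 (by omega)
        (by rw [if_neg (by omega)]; omega) (q * mN + f)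
      rw [if_neg (by omega)] at hcyc
      simp only [Nat.add_zero] at hcyc
      rw [show (q + 1) * mN + f = mN + (q * mN + f) by ring, hcyc]
      exact ih (k + 1) f (by omega)

-- indexing a flatMap of constant-length pieces
theorem flatMap_getD {α β : Type} (f : α → List β) (d : Nat) (x₀ : α) (dflt : β) :
    ∀ (l : List α) (i : Nat), (∀ x ∈ l, (f x).length = d) → i < l.length * d →
      (l.flatMap f).getD i dflt = (f (l.getD (i / d) x₀)).getD (i % d) dflt := by
  intro l
  induction l with
  | nil => intro i _ hi; simp at hi
  | cons x l ih =>
      intro i hd hi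
      have hdx : (f x).length = d := hd x (List.mem_cons_self)
      have hd0 : 0 < d := by
        rcases Nat.eq_zero_or_pos d with h | h
        · subst h; simp at hi
        · exact h
      rw [List.flatMap_cons]
      by_cases hi' : i < d
      · rw [List.getD_append _ _ _ _ (by omega),
          Nat.div_eq_of_lt hi', Nat.mod_eq_of_lt hi']
        simp
      · have hdi : d ≤ i := by omega
        rw [List.getD_append_right _ _ _ _ (by omega), hdx]
        have hi2 : i - d < l.length * d := by
          simp only [List.length_cons] at hi
          have : (l.length + 1) * d = l.length * d + d := by ring
          omega
        rw [ih (i - d) (fun y hy => hd y (List.mem_cons_of_mem _ hy)) hi2]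
        have hdiv : i / d = (i - d) / d + 1 := Nat.div_eq_sub_div hd0 hdi
        have hmod : i % d = (i - d) % d := Nat.mod_eq_sub_mod hdi
        rw [hdiv, hmod]
        simp

theorem flatMap_len {α β : Type} (f : α → List β) (d : Nat) :
    ∀ l : List α, (∀ x ∈ l, (f x).length = d) → (l.flatMap f).length = l.length * d := by
  intro l
  induction l with
  | nil => simp
  | cons x l ih =>
      intro hd
      rw [List.flatMap_cons, List.length_append, hd x List.mem_cons_self,
        ih (fun y hy => hd y (List.mem_cons_of_mem _ hy))]
      simp
      ring

theorem pvDigits_get (v : Nat) (hv : v < 16) :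
    (PySem.Str.pyGet? pvDigits (↑v)).toList = [pvDigitChar v] := by
  have hlen : pvDigits.toList.length = 16 := by decide
  have hdc : pvDigitChar v = pvDigits.toList[v]'(by omega) := by
    rw [pvDigitChar]
    exact List.getD_eq_getElem _ _ (by omega)
  rw [PySem.Str.pyGet?_natCast, List.getElem?_eq_getElem (by omega), hdc]
  rfl

theorem pvCharLoop_eq {n : Int} (hn2 : 2 ≤ n) (hn16 : n ≤ 16) :
    ∀ (fuel iN dN : Nat), 1 ≤ dN → iN + 1 ≤ fuel →
      pvCharLoop n fuel (↑iN) (↑dN) =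
        String.ofList [pvGF n.toNat ((pvF n.toNat 1 (n.toNat ^ (dN - 1) - 1)).length + iN)] := by
  intro fuel
  induction fuel with
  | zero => intro iN dN _ hf; omega
  | succ fuel ih =>
      intro iN dN hd hf
      set N := n.toNat with hNdef
      have hN2 : 2 ≤ N := by omega
      have hn : n = (N : Int) := by omega
      set P := N ^ (dN - 1) with hPdef
      set cnt := (N - 1) * P with hcntdef
      set B := cnt * dN with hBdef
      set off := (pvF N 1 (P - 1)).length with hoffdef
      have hP1 : 1 ≤ P := Nat.one_le_pow _ _ (by omega)
      have hNP : N * P = N ^ dN := by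
        rw [hPdef, ← pow_succ']
        congr 1
        omega
      have hPcnt : P + cnt = N ^ dN := by
        rw [hcntdef, ← hNP]
        have h : P + (N - 1) * P = ((N - 1) + 1) * P := by ring
        rw [h, show (N - 1) + 1 = N by omega]
      have hB1 : 1 ≤ B := by
        rw [hBdef, hcntdef]
        exact Nat.mul_pos (Nat.mul_pos (by omega) hP1) (by omega)
      have hmem : ∀ x ∈ List.range' P cnt, (pvRep N x).length = dN := by
        intro x hx
        rw [List.mem_range'_1] at hx
        unfold pvRep
        rw [List.length_map]
        exact (pvDigs_spec hN2 dN hd x hx.1 (by omega)).1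
      have hlenG : (pvF N P cnt).length = B := by
        unfold pvF
        rw [flatMap_len _ dN _ hmem, List.length_range']
      have hsplit : pvF N 1 (N ^ dN - 1) = pvF N 1 (P - 1) ++ pvF N P cnt := by
        have h1 : (P - 1) + cnt = N ^ dN - 1 := by omega
        have h2 : 1 + (P - 1) = P := by omega
        rw [← h1, pvF_split, h2]
      have hlenAll : (pvF N 1 (N ^ dN - 1)).length = off + B := by
        rw [hsplit, List.length_append, hlenG]
      have hblock : (n - 1) * n ^ ((dN : Int) - 1).toNat * (dN : Int) = (B : Int) := by
        rw [hn, show ((dN : Int) - 1).toNat = dN - 1 by omega]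
        push_cast [hBdef, hcntdef, hPdef, Nat.cast_sub (show 1 ≤ N by omega)]
        ring
      simp only [pvCharLoop, hblock]
      by_cases hcase : iN < B
      · rw [if_pos (by exact_mod_cast hcase)]
        set j := iN % dN with hjdef
        have hjd : j < dN := Nat.mod_lt _ (by omega)
        have hdivlt : iN / dN < cnt := by
          rw [Nat.div_lt_iff_lt_mul (by omega)]
          omega
        set x := P + iN / dN with hxdef
        have hxhi : x < N ^ dN := by omega
        set v := x / N ^ (dN - 1 - j) % N with hvdef
        have hv16 : v < 16 := by
          have := Nat.mod_lt (x / N ^ (dN - 1 - j)) (show 0 < N by omega)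
          omega
        have hnum : n ^ ((dN : Int) - 1).toNat + PySem.Int.floordiv (↑iN) (↑dN) = ((x : Nat) : Int) := by
          rw [hn, show ((dN : Int) - 1).toNat = dN - 1 by omega, PySem.Int.floordiv_natCast]
          push_cast [hxdef, hPdef]
          ring
        have hmodi : PySem.Int.mod (↑iN) (↑dN) = ((j : Nat) : Int) := by
          rw [PySem.Int.mod_natCast]
        have hexp : ((dN : Int) - 1 - ((j : Nat) : Int)).toNat = dN - 1 - j := by omega
        rw [hnum, hmodi, hexp, hn,
          show ((N : Int)) ^ (dN - 1 - j) = ((N ^ (dN - 1 - j) : Nat) : Int) by push_cast; ring,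
          PySem.Int.floordiv_natCast, PySem.Int.mod_natCast, pvDigits_get _ hv16]
        congr 1
        -- pvDigitChar v = pvGF N (off + iN)  (as [a] = [b])
        have hstab : pvGF N (off + iN) = (pvF N 1 (N ^ dN - 1)).getD (off + iN) ' ' :=
          (pvGF_stab hN2 (by omega)).symm
        rw [hstab, hsplit, List.getD_append_right _ _ _ _ (by omega)]
        simp only [show off + iN - (pvF N 1 (P - 1)).length = iN by rw [← hoffdef]; omega]
        unfold pvF
        rw [flatMap_getD _ dN 0 ' ' _ _ hmem (by rw [List.length_range']; omega)]
        have hrg : (List.range' P cnt).getD (iN / dN) 0 = x := by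
          rw [List.getD_eq_getElem _ _ (by rw [List.length_range']; exact hdivlt),
            List.getElem_range']
          rw [one_mul]
        rw [hrg]
        have hlrep : (pvRep N x).length = dN := by
          unfold pvRep
          rw [List.length_map]
          exact (pvDigs_spec hN2 dN hd x (Nat.le_add_right _ _) hxhi).1
        rw [List.getD_eq_getElem _ _ (by rw [hlrep]; exact Nat.mod_lt _ (by omega))]
        unfold pvRep
        rw [List.getElem_map]
        have hdig := (pvDigs_spec hN2 dN hd x (Nat.le_add_right _ _) hxhi).2 j hjd
        rw [List.getD_eq_getElem _ _ (by
          rw [(pvDigs_spec hN2 dN hd x (Nat.le_add_right _ _) hxhi).1]; exact hjd)] at hdig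
        rw [hdig]
      · rw [if_neg (by
          intro hlt
          exact hcase (by exact_mod_cast hlt))]
        have hsub : (↑iN : Int) - (↑B : Int) = ((iN - B : Nat) : Int) := by omega
        have hd1 : (dN : Int) + 1 = ((dN + 1 : Nat) : Int) := by push_cast; ring
        rw [hsub, hd1, ih (iN - B) (dN + 1) (by omega) (by omega)]
        congr 3
        rw [show dN + 1 - 1 = dN by omega]
        rw [show (pvF N 1 (N ^ dN - 1)).length = off + B from hlenAll]
        omega

theorem pvCharAt_eq {n : Int} (hn2 : 2 ≤ n) (hn16 : n ≤ 16) (w : Nat) :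
    pvCharAt n (↑w) = String.ofList [pvSChar n.toNat w] := by
  cases w with
  | zero =>
      rw [pvCharAt, if_pos (show ((0 : Nat) : Int) = 0 by simp)]
      have : pvSChar n.toNat 0 = '0' := rfl
      rw [this]
  | succ j =>
      rw [pvCharAt, if_neg (by exact_mod_cast Nat.succ_ne_zero j)]
      have h1 : ((j + 1 : Nat) : Int) - 1 = (j : Int) := by push_cast; ring
      rw [h1, Int.toNat_natCast,
        show (1 : Int) = ((1 : Nat) : Int) by simp,
        pvCharLoop_eq hn2 hn16 (j + 1) j 1 (le_refl 1) (le_refl _)]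
      rw [pvSChar_succ (by omega)]
      congr 2
      rw [show n.toNat ^ (1 - 1) - 1 = 0 by simp]
      simp [pvF]

theorem join_singletons {α : Type} (l : List α) (f : α → Char) :
    PySem.Str.join "" (l.map (fun a => String.ofList [f a])) = String.ofList (l.map f) := by
  have h := PySem.Str.toList_join "" (l.map fun a => String.ofList [f a])
  have h2 : (l.map fun a => String.ofList [f a]).map String.toList
      = (l.map f).map (fun c => [c]) := by
    rw [List.map_map, List.map_map]
    apply List.map_congr_left
    intro a _
    simp [String.toList_ofList]
  rw [h2] at h
  have h3 : ("" : String).toList = [] := rfl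
  rw [h3, PySem.Chars.join_nil_singletons] at h
  calc PySem.Str.join "" (l.map (fun a => String.ofList [f a]))
      = String.ofList (PySem.Str.join "" (l.map (fun a => String.ofList [f a]))).toList :=
        String.ofList_toList.symm
    _ = String.ofList (l.map f) := by rw [h]

-- the degenerate corner t = m = p = 1: A never consults n; both return "0"
theorem solution_one (n : Int) : solution n 1 1 1 = "0" := by
  show String.ofList (pvPick 1 1 1 ((pvBuild n ((1 : Int) * 1) ((1 : Int) * 1).toNat 1 ['0'] 1).1.reverse) ((1 : Int) * 1).toNat 0 []) = "0"
  have hb : (pvBuild n ((1 : Int) * 1) ((1 : Int) * 1).toNat 1 ['0'] 1).1.reverse = ['0'] := by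
    show (pvBuild n 1 1 1 ['0'] 1).1.reverse = ['0']
    rw [pvBuild, if_neg (by norm_num)]
    rfl
  rw [hb]
  show String.ofList (pvPick 1 1 1 ['0'] 1 0 []) = "0"
  rw [pvPick, if_pos (by norm_num),
    if_pos (show PySem.Int.mod 0 1 + 1 = 1 from by decide)]
  rfl

theorem solution_alt_one (n : Int) : solution_alt n 1 1 1 = "0" := by
  unfold solution_alt
  rw [show PySem.List.pyRange 0 1 1 = [0] from by decide]
  simp only [List.map_cons, List.map_nil]
  rw [show (0 : Int) * 1 + 1 - 1 = 0 by ring, pvCharAt, if_pos rfl]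
  decide

-- ===== VERDICT (by name: the statement is the Claim_ definition above) =====
theorem solution_spec : Claim_equal_solution := by
  unfold Claim_equal_solution
  intro n t m p _ hpre
  unfold Spec_solution
  obtain ⟨hpre1, hpre2⟩ := hpre
  by_cases ht0 : t ≤ 0
  · -- t ≤ 0: no characters are picked, both return ""
    have hA : solution n t m p = String.ofList [] := by
      show String.ofList (pvPick m p t ((pvBuild n (t * m) (t * m).toNat 1 ['0'] 1).1.reverse) (t * m).toNat 0 []) = String.ofList []
      rw [pvPick_done (by simp; omega)]
    have hB : solution_alt n t m p = "" := by
      unfold solution_alt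
      rw [PySem.List.pyRange_one_eq_nil (by omega)]
      rfl
    rw [hA, hB]
  · have ht1 : 1 ≤ t := by omega
    have hp1m : 1 ≤ p ∧ p ≤ m := by
      rcases hpre1 with h | h
      · omega
      · exact h
    obtain ⟨hp1, hpm⟩ := hp1m
    have hm1 : 1 ≤ m := by omega
    by_cases hn2 : 2 ≤ n ∧ n ≤ 16
    · -- main case
      obtain ⟨hn2', hn16⟩ := hn2
      set N := n.toNat with hNdef
      set tN := t.toNat with htNdef
      set mN := m.toNat with hmNdef
      set pN := p.toNat with hpNdef
      have hn : n = (N : Int) := by omega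
      have ht : t = (tN : Int) := by omega
      have hm : m = (mN : Int) := by omega
      have hp : p = (pN : Int) := by omega
      have hp1N : 1 ≤ pN := by omega
      have hpmN : pN ≤ mN := by omega
      have htm : (t * m).toNat = tN * mN := by
        rw [ht, hm, show ((tN : Int)) * ((mN : Int)) = ((tN * mN : Nat) : Int) by push_cast; ring,
          Int.toNat_natCast]
      obtain ⟨M', hinit, hlen⟩ := pvBuild_jinsu (tm := t * m) hn2' hn16 (by omega)
      rw [← hNdef] at hinit hlen
      have hsolu : solution n t m p = String.ofList (pvPick m p t (pvPref N M') (tN * mN) 0 []) := by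
        show String.ofList (pvPick m p t ((pvBuild n (t * m) (t * m).toNat 1 ['0'] 1).1.reverse) (t * m).toNat 0 []) = _
        rw [hinit, htm]
      rw [hsolu]
      have hpick := pvPick_outer (jinsu := pvPref N M') hm hp ht hp1N hpmN tN 0 0 (by omega)
      rw [show tN * mN + 0 = tN * mN by ring, show ((0 * mN : Nat) : Int) = 0 by simp] at hpick
      have hans0 : pvAnsOf (pvPref N M') mN pN 0 = [] := rfl
      rw [hans0] at hpick
      rw [hpick]
      -- B side
      have hB : solution_alt n t m p
          = String.ofList ((List.range tN).map (fun k => pvSChar N (k * mN + pN - 1))) := by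
        unfold solution_alt
        rw [show PySem.List.pyRange 0 t 1 = (List.range tN).map (fun k : Nat => (k : Int)) from by
              rw [PySem.List.pyRange_one, show (t - 0).toNat = tN by omega]
              apply List.map_congr_left
              intro a _
              simp]
        rw [List.map_map]
        have hfun : ((fun k : Int => pvCharAt n (k * m + p - 1)) ∘ fun k : Nat => (k : Int))
            = fun k : Nat => String.ofList [pvSChar N (k * mN + pN - 1)] := by
          funext k
          simp only [Function.comp_apply]
          have harg : (k : Int) * m + p - 1 = ((k * mN + pN - 1 : Nat) : Int) := by
            have h1 : 1 ≤ k * mN + pN := by omega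
            rw [hm, hp]
            push_cast [Nat.cast_sub h1]
            ring
          rw [harg]
          exact pvCharAt_eq hn2' hn16 _
        rw [hfun, join_singletons]
      rw [hB]
      congr 1
      unfold pvAnsOf
      apply List.map_congr_left
      intro k hk
      rw [List.mem_range] at hk
      have hidx : k * mN + pN - 1 < (pvPref N M').length := by
        have hb := Nat.mul_le_mul_right mN (show k + 1 ≤ tN by omega)
        have hexp : (k + 1) * mN = k * mN + mN := by ring
        have hlen' : tN * mN ≤ (pvPref N M').length := by
          rw [ht, hm, show ((tN : Int)) * ((mN : Int)) = ((tN * mN : Nat) : Int) by push_cast; ring] at hlen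
          omega
        omega
      exact pvSChar_stab (by omega) hidx
    · -- degenerate corner: t*m ≤ 1 forces t = m = p = 1; n is never consulted
      have htm1 : t * m ≤ 1 := by
        rcases hpre2 with h | h
        · exact h
        · exact absurd h hn2
      have hmt : m ≤ t * m := le_mul_of_one_le_left (by omega) (by omega)
      have htt : t ≤ t * m := le_mul_of_one_le_right (by omega) (by omega)
      have ht1' : t = 1 := by omega
      have hm1' : m = 1 := by omega
      have hp1' : p = 1 := by omega
      subst ht1' hm1' hp1'
      rw [solution_one, solution_alt_one]
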